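-- pv_equiv track=rewrite | github.com/Nunolxm/ATP | TPC6/obras.py | titporPeriodo
-- ===== SOURCE A (Python) =====
-- def titporPeriodo(obras):
--     dici={}
--     for nome, _, _, periodo, *_ in obras:
--         if periodo in dici.keys():
--             dici[periodo].append(nome)
--         else:
--             dici[periodo]=[nome]
--     return dici
-- ===== SOURCE B (Python) =====
-- def titporPeriodo(obras):
--     periodos = list(dict.fromkeys(obra[3] for obra in obras))
--     return {p: [obra[0] for obra in obras if obra[3] == p] for p in periodos}
-- ===== Notes on version B (the rewrite author's own statement) =====
-- stated objective: alternative
-- what changed: Replaces the single-pass incremental dict grouping with a two-phase shape: first dedup the periods in first-appearance order, then build the result by a per-period scan collecting matching names.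
import Mathlib
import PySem

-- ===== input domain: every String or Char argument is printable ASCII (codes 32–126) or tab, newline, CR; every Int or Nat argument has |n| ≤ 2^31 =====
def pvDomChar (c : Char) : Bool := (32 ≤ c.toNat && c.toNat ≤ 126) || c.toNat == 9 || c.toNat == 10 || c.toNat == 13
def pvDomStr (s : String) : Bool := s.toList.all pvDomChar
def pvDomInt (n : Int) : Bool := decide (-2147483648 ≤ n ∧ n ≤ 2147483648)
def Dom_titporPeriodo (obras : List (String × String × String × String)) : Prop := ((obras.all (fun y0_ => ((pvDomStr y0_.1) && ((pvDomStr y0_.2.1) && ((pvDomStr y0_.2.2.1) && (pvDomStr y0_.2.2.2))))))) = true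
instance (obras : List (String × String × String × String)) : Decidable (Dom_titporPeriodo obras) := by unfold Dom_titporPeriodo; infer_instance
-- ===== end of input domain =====

-- B replaces A's single-pass incremental dict grouping by: dedup the periods in
-- first-appearance order, then collect each period's names by a per-period scan (alternative decomposition).

-- ===== PORT A =====
def titporPeriodo (obras : List (String × String × String × String)) : List (String × List String) :=
  (obras.foldl (fun dici ob =>
      if dici.contains ob.2.2.2 then
        dici.modify ob.2.2.2 [] (fun l => l ++ [ob.1])
      else
        dici.insert ob.2.2.2 [ob.1])
    PySem.Dict.empty).items

-- ===== PORT B =====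
def titporPeriodo_alt (obras : List (String × String × String × String)) : List (String × List String) :=
  let periodos := PySem.List.dedup (obras.map (fun ob => ob.2.2.2))
  periodos.map (fun p => (p, (obras.filter (fun ob => ob.2.2.2 == p)).map (fun ob => ob.1)))

-- ===== PRECONDITION & SPEC =====
def Spec_titporPeriodo (obras : List (String × String × String × String)) (out : List (String × List String)) : Prop := out = titporPeriodo_alt obras
instance (obras : List (String × String × String × String)) (out : List (String × List String)) : Decidable (Spec_titporPeriodo obras out) := by unfold Spec_titporPeriodo; infer_instance

-- ===== CLAIM (what is proved, stated in full; the proofs are below) =====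
def Claim_equal_titporPeriodo : Prop := ∀ (obras : List (String × String × String × String)), Dom_titporPeriodo obras → Spec_titporPeriodo obras (titporPeriodo obras)

-- ===== LEMMAS AND PROOFS =====

-- A's loop body is one dict "modify", whether the key is new or present.
theorem pvStep_eq_modify (d : PySem.Dict String (List String)) (ob : String × String × String × String) :
    (if d.contains ob.2.2.2 then d.modify ob.2.2.2 [] (fun l => l ++ [ob.1])
     else d.insert ob.2.2.2 [ob.1]) = d.modify ob.2.2.2 [] (fun l => l ++ [ob.1]) := by
  by_cases h : d.contains ob.2.2.2
  · simp [h]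
  · simp only [Bool.not_eq_true] at h
    simp [h, PySem.Dict.modify, PySem.Dict.getD_of_not_contains _ _ h]

-- ===== VERDICT (by name: the statement is the Claim_ definition above) =====
theorem titporPeriodo_spec : Claim_equal_titporPeriodo := by
  intro obras _
  unfold Spec_titporPeriodo titporPeriodo titporPeriodo_alt
  have hfold : obras.foldl (fun dici ob =>
      if dici.contains ob.2.2.2 then dici.modify ob.2.2.2 [] (fun l => l ++ [ob.1])
      else dici.insert ob.2.2.2 [ob.1]) PySem.Dict.empty
      = obras.foldl (fun dici ob => dici.modify ob.2.2.2 [] (fun l => l ++ [ob.1])) PySem.Dict.empty := by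
    congr 1
    funext d ob
    exact pvStep_eq_modify d ob
  rw [hfold]
  set d := obras.foldl (fun dici ob => dici.modify ob.2.2.2 [] (fun l => l ++ [ob.1])) PySem.Dict.empty with hd
  have hnd : d.keys.Nodup := by
    rw [hd]
    exact PySem.Dict.nodup_keys_foldl_modify_key obras (fun ob => ob.2.2.2) [] (fun _ ob l => l ++ [ob.1]) _ (by simp)
  have hkeys : d.keys = PySem.List.dedup (obras.map (fun ob => ob.2.2.2)) := by
    rw [hd, PySem.Dict.keys_foldl_modify_key obras (fun ob => ob.2.2.2) [] (fun _ ob l => l ++ [ob.1]) _]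
    simp [PySem.List.dedup_eq_ofList, PySem.Dict.keys, PySem.Dict.empty, PySem.Set.update_nil_left]
  rw [PySem.Dict.items_eq_map_keys d hnd [], hkeys]
  apply List.map_congr_left
  intro p _
  have hgetD : d.getD p [] = (obras.filter (fun ob => ob.2.2.2 == p)).map (fun ob => ob.1) := by
    rw [hd]
    have : obras.foldl (fun dici ob => dici.modify ob.2.2.2 [] (fun l => l ++ [ob.1])) PySem.Dict.empty
        = (obras.map (fun ob => (ob.2.2.2, ob.1))).foldl (fun dici pr => dici.modify pr.1 [] (fun l => l ++ [pr.2])) PySem.Dict.empty := by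
      rw [List.foldl_map]
    rw [this, PySem.Dict.getD_foldl_modify_append]
    simp [List.filter_map, Function.comp_def]
  rw [hgetD]
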